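-- pv_equiv track=rewrite | github.com/3D1T0R/PortableApps.com-DevelopmentToolkit | paf/appinfo.py | valid_appid
-- ===== SOURCE A (Python) =====
-- def valid_appid(appid):
--     "Check if an AppID is valid and correct it. Returns (valid, appid)."
--
--     valid_characters = set('0123456789.-+_ABCDEFGHIJKLMNOPQRSTUVWXYZ' +
--             'abcdefghijklmnopqrstuvwxyz')
--
--     new = appid.replace(' ', '')
--     new = new.replace('(', '')
--     new = new.replace(')', '')
--     new = new.replace('[', '')
--     new = new.replace(']', '')
--     new = new.replace('~', '-')
--     new = new.replace('&', '+')
--     new = new.replace('#', '+')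
--     new = new.replace('"', '')
--     new = new.replace('*', '+')
--     new = new.replace('/', '_')
--     new = new.replace('\\', '_')
--     new = new.replace(':', '.')
--     new = new.replace('<', '-')
--     new = new.replace('>', '-')
--     new = new.replace('?', '')
--     new = new.replace('|', '-')
--     new = new.replace('=', '-')
--     new = new.replace(',', '.')
--     new = new.replace(';', '.')
--
--     i = 0
--     while i < len(new):
--         if new[i] not in valid_characters:
--             # Cut out the character
--             new = new[:i] + new[i + 1:]
--         else:
--             i += 1
--
--     if appid != new:
--         return False, new
--     else:
--         return True, appid
-- ===== SOURCE B (Python) =====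
-- _TRANS = {'~': '-', '&': '+', '#': '+', '*': '+', '/': '_', '\\': '_',
--           ':': '.', '<': '-', '>': '-', '|': '-', '=': '-', ',': '.', ';': '.'}
-- _VALID = frozenset('0123456789.-+_ABCDEFGHIJKLMNOPQRSTUVWXYZ'
--                    'abcdefghijklmnopqrstuvwxyz')
-- _TABLE = str.maketrans(_TRANS)
--
-- def valid_appid(appid):
--     t = appid.translate(_TABLE)
--     new = ''.join(filter(_VALID.__contains__, t))
--     return (appid == new, appid if appid == new else new)
-- ===== Notes on version B (the rewrite author's own statement) =====
-- stated objective: faster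
-- what changed: Replaces A's 20 sequential whole-string str.replace passes plus a slice-and-reconcatenate deletion loop (quadratic when characters are deleted) with a single str.translate over a 13-entry table followed by one filtering join against the valid-character set.
import Mathlib
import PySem

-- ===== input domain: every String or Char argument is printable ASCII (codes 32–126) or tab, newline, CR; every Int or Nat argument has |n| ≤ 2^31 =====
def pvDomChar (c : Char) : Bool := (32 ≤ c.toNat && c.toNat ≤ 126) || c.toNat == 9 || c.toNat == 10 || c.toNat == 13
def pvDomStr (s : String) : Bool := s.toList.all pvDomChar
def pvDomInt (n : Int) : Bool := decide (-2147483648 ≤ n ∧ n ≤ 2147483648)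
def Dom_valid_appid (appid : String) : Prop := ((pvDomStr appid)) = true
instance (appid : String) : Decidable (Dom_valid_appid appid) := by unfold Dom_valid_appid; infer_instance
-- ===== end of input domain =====

-- B replaces A's 20 sequential str.replace passes and slice-based per-character
-- deletion loop by one pass: str.translate with a 13-entry table, then a filter
-- against the valid set; the theorems prove the return values equal everywhere.

-- ===== PORT A =====
-- the local 'valid_characters = set(...)' of A
def pvValidCharsA : PySem.Set Char :=
  PySem.Set.ofList ("0123456789.-+_ABCDEFGHIJKLMNOPQRSTUVWXYZabcdefghijklmnopqrstuvwxyz".toList)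

-- A's while-loop: 'while i < len(new): if new[i] not in valid: new = new[:i] + new[i+1:] else: i += 1'
-- (fuel = a totality guard only: the loop performs at most len(new) steps of measure len-i)
def pvDelLoopA (vc : PySem.Set Char) (fuel : Nat) (l : List Char) (i : Nat) : List Char :=
  match fuel with
  | 0 => l
  | fuel + 1 =>
    if h : i < l.length then
      if PySem.Set.contains vc l[i] = false then
        pvDelLoopA vc fuel (PySem.List.slice l none (some (i : Int)) ++
                            PySem.List.slice l (some ((i : Int) + 1)) none) i
      else pvDelLoopA vc fuel l (i + 1)
    else l

def valid_appid (appid : String) : Bool × String :=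
  let valid_characters := pvValidCharsA
  let new := PySem.Str.replace (PySem.Str.replace (PySem.Str.replace (PySem.Str.replace (PySem.Str.replace (PySem.Str.replace (PySem.Str.replace (PySem.Str.replace (PySem.Str.replace (PySem.Str.replace (PySem.Str.replace (PySem.Str.replace (PySem.Str.replace (PySem.Str.replace (PySem.Str.replace (PySem.Str.replace (PySem.Str.replace (PySem.Str.replace (PySem.Str.replace (PySem.Str.replace (appid) " " "") "(" "") ")" "") "[" "") "]" "") "~" "-") "&" "+") "#" "+") "\"" "") "*" "+") "/" "_") "\\" "_") ":" ".") "<" "-") ">" "-") "?" "") "|" "-") "=" "-") "," ".") ";" "."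
  let final := String.ofList (pvDelLoopA valid_characters new.toList.length new.toList 0)
  if appid ≠ final then (false, final) else (true, appid)

-- ===== PORT B =====
def pvTransB : PySem.Dict Char Char :=
  PySem.Dict.ofList [('~', '-'), ('&', '+'), ('#', '+'), ('*', '+'), ('/', '_'), ('\\', '_'), (':', '.'), ('<', '-'), ('>', '-'), ('|', '-'), ('=', '-'), (',', '.'), (';', '.')]

def pvValidB : PySem.Set Char :=
  PySem.Set.ofList ("0123456789.-+_ABCDEFGHIJKLMNOPQRSTUVWXYZabcdefghijklmnopqrstuvwxyz".toList)

def valid_appid_alt (appid : String) : Bool × String :=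
  -- appid.translate(_TABLE) with a 1-char-to-1-char table is exactly a per-character
  -- dict lookup (chars absent from the table pass through unchanged); the
  -- ''.join(filter(...)) is ported as String.ofList of the filtered char list
  let new := String.ofList
    ((appid.toList.map (fun c => PySem.Dict.getD pvTransB c c)).filter
      (fun c => PySem.Set.contains pvValidB c))
  (appid == new, if appid == new then appid else new)

-- ===== PRECONDITION & SPEC =====
def Spec_valid_appid (appid : String) (out : Bool × String) : Prop := out = valid_appid_alt appid
instance (appid : String) (out : Bool × String) : Decidable (Spec_valid_appid appid out) := by unfold Spec_valid_appid; infer_instance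

-- ===== CLAIM (what is proved, stated in full; the proofs are below) =====
def Claim_equal_valid_appid : Prop := ∀ (appid : String), Dom_valid_appid appid → Spec_valid_appid appid (valid_appid appid)

-- ===== LEMMAS AND PROOFS =====

theorem pvGoSingle (c : Char) (new : List Char) :
    ∀ (l : List Char) (fuel : Nat) (acc : List Char), l.length ≤ fuel →
      PySem.Chars.replace.go [c] new fuel l acc
        = acc.reverse ++ l.flatMap (fun x => if x = c then new else [x]) := by
  intro l
  induction l with
  | nil => intro fuel acc _; cases fuel <;> simp [PySem.Chars.replace.go]
  | cons x t ih =>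
    intro fuel acc h
    cases fuel with
    | zero => simp at h
    | succ m =>
      by_cases hx : x = c
      · subst hx
        rw [show PySem.Chars.replace.go [x] new (m+1) (x :: t) acc
              = PySem.Chars.replace.go [x] new m t (new.reverse ++ acc) by
            simp [PySem.Chars.replace.go, List.isPrefixOf]]
        rw [ih m (new.reverse ++ acc) (by simpa using h)]
        simp
      · rw [show PySem.Chars.replace.go [c] new (m+1) (x :: t) acc
              = PySem.Chars.replace.go [c] new m t (x :: acc) by
            simp [PySem.Chars.replace.go, List.isPrefixOf, Ne.symm hx]]
        rw [ih m (x :: acc) (by simpa using h)]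
        simp [hx]

-- str.replace with a one-character pattern is a per-character flatMap
theorem pvReplaceSingle (c : Char) (new l : List Char) :
    PySem.Chars.replace l [c] new = l.flatMap (fun x => if x = c then new else [x]) := by
  rw [PySem.Chars.replace, if_neg (by simp), pvGoSingle c new l l.length [] le_rfl]
  simp

theorem pvDelLoopA_spec (vc : PySem.Set Char) :
    ∀ (fuel : Nat) (l : List Char) (i : Nat), l.length - i ≤ fuel →
    (∀ c ∈ l.take i, PySem.Set.contains vc c = true) →
    pvDelLoopA vc fuel l i = l.take i ++ (l.drop i).filter (fun c => PySem.Set.contains vc c) := by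
  intro fuel
  induction fuel with
  | zero =>
    intro l i hf hv
    have hle : l.length ≤ i := by omega
    rw [pvDelLoopA]
    simp [List.take_of_length_le hle, List.drop_of_length_le hle]
  | succ fuel ih =>
    intro l i hf hv
    rw [pvDelLoopA]
    by_cases h : i < l.length
    · rw [dif_pos h]
      by_cases hc : PySem.Set.contains vc l[i] = false
      · rw [if_pos hc]
        rw [PySem.List.slice_to l (by omega : (0:Int) ≤ (i:Int)),
            PySem.List.slice_from l (by omega : (0:Int) ≤ (i:Int)+1)]
        have hto : ((i:Int)+1).toNat = i + 1 := by omega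
        have hto0 : ((i:Int)).toNat = i := by omega
        rw [hto, hto0]
        have htake : (l.take i ++ l.drop (i+1)).take i = l.take i := by
          rw [List.take_append_of_le_length (by simp; omega)]
          simp
        have hdrop : (l.take i ++ l.drop (i+1)).drop i = l.drop (i+1) := by
          rw [List.drop_append_of_le_length (by simp; omega)]
          simp
        rw [ih (l.take i ++ l.drop (i+1)) i (by simp; omega) (by rw [htake]; exact hv),
            htake, hdrop]
        rw [List.drop_eq_getElem_cons h, List.filter_cons, hc]
        simp
      · rw [if_neg hc]
        have hc' : PySem.Set.contains vc l[i] = true := by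
          cases hb : PySem.Set.contains vc l[i] <;> simp_all
        rw [ih l (i+1) (by omega) (by
          intro c hcmem
          rw [List.take_succ_eq_append_getElem h] at hcmem
          rcases List.mem_append.mp hcmem with h1 | h1
          · exact hv c h1
          · simp at h1; subst h1; exact hc')]
        rw [List.take_succ_eq_append_getElem h]
        rw [List.drop_eq_getElem_cons h, List.filter_cons, hc']
        rw [if_pos rfl, List.append_assoc, List.singleton_append]
    · rw [dif_neg h]
      simp at h
      simp [List.take_of_length_le h, List.drop_of_length_le h]

theorem pvMapFilter (l : List Char) (f : Char → Char) (p : Char → Bool) :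
    (l.map f).filter p = l.flatMap (fun c => if p (f c) then [f c] else []) := by
  induction l with
  | nil => rfl
  | cons x t ih =>
    simp only [List.map_cons, List.filter_cons, List.flatMap_cons, ← ih]
    cases hp : p (f x) <;> simp

-- per-character agreement of the two pipelines
set_option maxRecDepth 8192 in
set_option maxHeartbeats 1600000 in
theorem pvPointwise (c : Char) :
    List.flatMap (fun a => List.flatMap (fun a => List.flatMap (fun a => List.flatMap (fun a => List.flatMap (fun a => List.flatMap (fun a => List.flatMap (fun a => List.flatMap (fun a => List.flatMap (fun a => List.flatMap (fun a => List.flatMap (fun a => List.flatMap (fun a => List.flatMap (fun a => List.flatMap (fun a => List.flatMap (fun a => List.flatMap (fun a => List.flatMap (fun a => List.flatMap (fun a => List.flatMap (fun a => List.filter (fun c => pvValidCharsA.contains c) (if a = ';' then ['.'] else [a])) (if a = ',' then ['.'] else [a])) (if a = '=' then ['-'] else [a])) (if a = '|' then ['-'] else [a])) (if a = '?' then [] else [a])) (if a = '>' then ['-'] else [a])) (if a = '<' then ['-'] else [a])) (if a = ':' then ['.'] else [a])) (if a = '\\' then ['_'] else [a])) (if a = '/' then ['_'] else [a])) (if a =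 '*' then ['+'] else [a])) (if a = '"' then [] else [a])) (if a = '#' then ['+'] else [a])) (if a = '&' then ['+'] else [a])) (if a = '~' then ['-'] else [a])) (if a = ']' then [] else [a])) (if a = '[' then [] else [a])) (if a = ')' then [] else [a])) (if a = '(' then [] else [a]))
      (if c = ' ' then [] else [c])
      = (if pvValidB.contains (pvTransB.getD c c) = true
          then [pvTransB.getD c c] else []) := by
  by_cases h1 : c = ' '
  · subst h1; decide
  by_cases h2 : c = '('
  · subst h2; decide
  by_cases h3 : c = ')'
  · subst h3; decide
  by_cases h4 : c = '['
  · subst h4; decide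
  by_cases h5 : c = ']'
  · subst h5; decide
  by_cases h6 : c = '~'
  · subst h6; decide
  by_cases h7 : c = '&'
  · subst h7; decide
  by_cases h8 : c = '#'
  · subst h8; decide
  by_cases h9 : c = '"'
  · subst h9; decide
  by_cases h10 : c = '*'
  · subst h10; decide
  by_cases h11 : c = '/'
  · subst h11; decide
  by_cases h12 : c = '\\'
  · subst h12; decide
  by_cases h13 : c = ':'
  · subst h13; decide
  by_cases h14 : c = '<'
  · subst h14; decide
  by_cases h15 : c = '>'
  · subst h15; decide
  by_cases h16 : c = '?'
  · subst h16; decide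
  by_cases h17 : c = '|'
  · subst h17; decide
  by_cases h18 : c = '='
  · subst h18; decide
  by_cases h19 : c = ','
  · subst h19; decide
  by_cases h20 : c = ';'
  · subst h20; decide
  have e6 : ('~' == c) = false := by simp [Ne.symm h6]
  have e7 : ('&' == c) = false := by simp [Ne.symm h7]
  have e8 : ('#' == c) = false := by simp [Ne.symm h8]
  have e10 : ('*' == c) = false := by simp [Ne.symm h10]
  have e11 : ('/' == c) = false := by simp [Ne.symm h11]
  have e12 : ('\\' == c) = false := by simp [Ne.symm h12]
  have e13 : (':' == c) = false := by simp [Ne.symm h13]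
  have e14 : ('<' == c) = false := by simp [Ne.symm h14]
  have e15 : ('>' == c) = false := by simp [Ne.symm h15]
  have e17 : ('|' == c) = false := by simp [Ne.symm h17]
  have e18 : ('=' == c) = false := by simp [Ne.symm h18]
  have e19 : (',' == c) = false := by simp [Ne.symm h19]
  have e20 : (';' == c) = false := by simp [Ne.symm h20]
  have hget : PySem.Dict.getD pvTransB c c = c := by
    simp [pvTransB, PySem.Dict.getD, PySem.Dict.ofList, PySem.Dict.get?, PySem.Dict.update,
          PySem.Dict.insert, PySem.Dict.empty, List.find?, e6, e7, e8, e10, e11, e12, e13, e14, e15, e17, e18, e19, e20]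
  rw [hget]
  simp only [List.flatMap_cons, List.flatMap_nil, List.append_nil, if_neg h1, if_neg h2, if_neg h3, if_neg h4, if_neg h5, if_neg h6, if_neg h7, if_neg h8, if_neg h9, if_neg h10, if_neg h11, if_neg h12, if_neg h13, if_neg h14, if_neg h15, if_neg h16, if_neg h17, if_neg h18, if_neg h19, if_neg h20]
  have hv : pvValidB = pvValidCharsA := rfl
  rw [hv]
  cases hb : PySem.Set.contains pvValidCharsA c
  · simp [List.filter_cons]
    simpa using hb
  · simp [List.filter_cons]
    simpa using hb

-- the whole A pipeline on the character list equals B's single pass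
set_option maxRecDepth 8192 in
set_option maxHeartbeats 2000000 in
theorem pvKey (s : String) :
    pvDelLoopA pvValidCharsA ((PySem.Str.replace (PySem.Str.replace (PySem.Str.replace (PySem.Str.replace (PySem.Str.replace (PySem.Str.replace (PySem.Str.replace (PySem.Str.replace (PySem.Str.replace (PySem.Str.replace (PySem.Str.replace (PySem.Str.replace (PySem.Str.replace (PySem.Str.replace (PySem.Str.replace (PySem.Str.replace (PySem.Str.replace (PySem.Str.replace (PySem.Str.replace (PySem.Str.replace (s) " " "") "(" "") ")" "") "[" "") "]" "") "~" "-") "&" "+") "#" "+") "\"" "") "*" "+") "/" "_") "\\" "_") ":" ".") "<" "-") ">" "-") "?" "") "|" "-") "=" "-") "," ".") ";" ".")).toList.length (PySem.Str.replace (PySem.Str.replace (PySem.Str.replace (PySem.Str.replace (PySem.Str.replace (PySem.Str.replace (PySem.Str.replace (PySem.Str.replace (PySem.Str.replace (PySem.Str.replace (PySem.Str.replace (PySem.Str.replace (PySem.Str.replace (PySem.Str.replace (PySem.Str.replace (PySem.Str.replace (PySem.Str.replace (PySem.Str.replace (PySem.Str.replace (PySem.Str.replace (s) " " "") "(" "")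 ")" "") "[" "") "]" "") "~" "-") "&" "+") "#" "+") "\"" "") "*" "+") "/" "_") "\\" "_") ":" ".") "<" "-") ">" "-") "?" "") "|" "-") "=" "-") "," ".") ";" ".").toList 0
      = (s.toList.map (fun c => PySem.Dict.getD pvTransB c c)).filter
          (fun c => PySem.Set.contains pvValidB c) := by
  simp only [PySem.Str.toList_replace,
    show ("" : String).toList = [] from rfl,
    show (" " : String).toList = [' '] from rfl,
    show ("\"" : String).toList = ['"'] from rfl,
    show ("#" : String).toList = ['#'] from rfl,
    show ("&" : String).toList = ['&'] from rfl,
    show ("(" : String).toList = ['('] from rfl,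
    show (")" : String).toList = [')'] from rfl,
    show ("*" : String).toList = ['*'] from rfl,
    show ("+" : String).toList = ['+'] from rfl,
    show ("," : String).toList = [','] from rfl,
    show ("-" : String).toList = ['-'] from rfl,
    show ("." : String).toList = ['.'] from rfl,
    show ("/" : String).toList = ['/'] from rfl,
    show (":" : String).toList = [':'] from rfl,
    show (";" : String).toList = [';'] from rfl,
    show ("<" : String).toList = ['<'] from rfl,
    show ("=" : String).toList = ['='] from rfl,
    show (">" : String).toList = ['>'] from rfl,
    show ("?" : String).toList = ['?'] from rfl,
    show ("[" : String).toList = ['['] from rfl,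
    show ("\\" : String).toList = ['\\'] from rfl,
    show ("]" : String).toList = [']'] from rfl,
    show ("_" : String).toList = ['_'] from rfl,
    show ("|" : String).toList = ['|'] from rfl,
    show ("~" : String).toList = ['~'] from rfl,
    pvReplaceSingle, List.flatMap_assoc]
  rw [pvDelLoopA_spec _ _ _ 0 (by simp) (by simp)]
  simp only [List.take_zero, List.drop_zero, List.nil_append, List.filter_flatMap]
  rw [pvMapFilter]
  congr 1
  funext c
  exact pvPointwise c

-- ===== VERDICT (by name: the statement is the Claim_ definition above) =====
theorem valid_appid_spec : Claim_equal_valid_appid := by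
  intro appid _
  show valid_appid appid = valid_appid_alt appid
  simp only [valid_appid, valid_appid_alt]
  rw [pvKey appid]
  generalize String.ofList
      ((appid.toList.map (fun c => PySem.Dict.getD pvTransB c c)).filter
        (fun c => PySem.Set.contains pvValidB c)) = t
  by_cases h : appid = t
  · subst h; simp
  · rw [if_pos h, beq_eq_false_iff_ne.mpr h]
    simp
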